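-- pv_equiv track=rewrite | github.com/ah96/environment_centered_explanations | generate_contrastive_environments.py | all_possible_perturbations
-- ===== SOURCE A (Python) =====
-- def all_possible_perturbations(original_cells, grid_size):
--     perturbations = []
--     for dx in range(-2, 3):
--         for dy in range(-2, 3):
--             if dx == 0 and dy == 0:
--                 continue
--             new_cells = [(x + dx, y + dy) for (x, y) in original_cells]
--             if all(0 <= x < grid_size and 0 <= y < grid_size for (x, y) in new_cells):
--                 perturbations.append((dx, dy, new_cells))
--     return perturbations
-- ===== SOURCE B (Python) =====
-- def all_possible_perturbations(original_cells, grid_size):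
--     rng = range(-2, 3)
--     if not original_cells:
--         # min/max below need a nonempty list; A's vacuous all() keeps every offset
--         return [(dx, dy, []) for dx in rng for dy in rng if not (dx == 0 and dy == 0)]
--     minx = min(x for (x, _) in original_cells)
--     maxx = max(x for (x, _) in original_cells)
--     miny = min(y for (_, y) in original_cells)
--     maxy = max(y for (_, y) in original_cells)
--     valid_dx = [dx for dx in rng if 0 <= minx + dx and maxx + dx < grid_size]
--     valid_dy = [dy for dy in rng if 0 <= miny + dy and maxy + dy < grid_size]
--     return [(dx, dy, [(x + dx, y + dy) for (x, y) in original_cells])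
--             for dx in valid_dx for dy in valid_dy if not (dx == 0 and dy == 0)]
-- ===== Notes on version B (the rewrite author's own statement) =====
-- stated objective: faster
-- what changed: Instead of rebuilding and fully scanning the shifted cell list for each of the 24 offsets, B computes min/max extremes of x and y in one pass, derives the valid dx- and dy-sets independently from the extremes, and only materialises new_cells for offsets already known valid (empty original_cells special-cased to emit all 24 offsets, matching A's vacuous all()).
import Mathlib
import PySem

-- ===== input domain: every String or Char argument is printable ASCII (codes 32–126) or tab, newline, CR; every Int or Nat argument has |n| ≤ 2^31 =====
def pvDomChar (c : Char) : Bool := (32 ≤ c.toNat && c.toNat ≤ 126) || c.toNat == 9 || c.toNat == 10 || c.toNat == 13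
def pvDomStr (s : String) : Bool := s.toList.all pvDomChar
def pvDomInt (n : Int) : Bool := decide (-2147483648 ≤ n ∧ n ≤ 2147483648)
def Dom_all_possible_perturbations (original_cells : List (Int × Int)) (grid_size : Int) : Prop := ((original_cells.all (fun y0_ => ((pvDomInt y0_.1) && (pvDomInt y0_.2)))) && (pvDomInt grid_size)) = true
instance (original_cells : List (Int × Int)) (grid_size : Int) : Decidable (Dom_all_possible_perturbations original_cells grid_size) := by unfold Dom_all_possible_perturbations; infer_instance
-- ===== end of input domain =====

-- B replaces A's per-offset full scan of the cells by one min/max pass: validity of an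
-- offset is checked against the four extremes (dx and dy independently), so invalid
-- offsets cost O(1); the empty cell list (where min/max have no input) keeps every offset,
-- exactly as A's vacuous all() does.

-- ===== PORT A =====
def all_possible_perturbations (original_cells : List (Int × Int)) (grid_size : Int) : List (Int × Int × (List (Int × Int))) :=
  (PySem.List.pyRange (-2) 3 1).foldl (fun perturbations dx =>
    (PySem.List.pyRange (-2) 3 1).foldl (fun perturbations dy =>
      if dx == 0 && dy == 0 then perturbations
      else
        let new_cells := original_cells.map (fun p => (p.1 + dx, p.2 + dy))
        if new_cells.all (fun p => decide (0 ≤ p.1) && decide (p.1 < grid_size) &&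
                                   (decide (0 ≤ p.2) && decide (p.2 < grid_size))) then
          perturbations ++ [(dx, dy, new_cells)]
        else perturbations) perturbations) []

-- ===== PORT B =====
def all_possible_perturbations_alt (original_cells : List (Int × Int)) (grid_size : Int) : List (Int × Int × (List (Int × Int))) :=
  let rng := PySem.List.pyRange (-2) 3 1
  if original_cells = [] then
    rng.flatMap (fun dx =>
      (rng.filter (fun dy => !(dx == 0 && dy == 0))).map
        (fun dy => (dx, dy, ([] : List (Int × Int)))))
  else
    -- min(...)/max(...) over a guarded-nonempty generator: PySem.List.min?/max?, default never used
    let minx := (PySem.List.min? (original_cells.map (fun p => p.1)) (fun v => v)).getD 0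
    let maxx := (PySem.List.max? (original_cells.map (fun p => p.1)) (fun v => v)).getD 0
    let miny := (PySem.List.min? (original_cells.map (fun p => p.2)) (fun v => v)).getD 0
    let maxy := (PySem.List.max? (original_cells.map (fun p => p.2)) (fun v => v)).getD 0
    let valid_dx := rng.filter (fun dx => decide (0 ≤ minx + dx) && decide (maxx + dx < grid_size))
    let valid_dy := rng.filter (fun dy => decide (0 ≤ miny + dy) && decide (maxy + dy < grid_size))
    valid_dx.flatMap (fun dx =>
      (valid_dy.filter (fun dy => !(dx == 0 && dy == 0))).map
        (fun dy => (dx, dy, original_cells.map (fun p => (p.1 + dx, p.2 + dy)))))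

-- ===== PRECONDITION & SPEC =====
def Spec_all_possible_perturbations (original_cells : List (Int × Int)) (grid_size : Int) (out : List (Int × Int × (List (Int × Int)))) : Prop := out = all_possible_perturbations_alt original_cells grid_size
instance (original_cells : List (Int × Int)) (grid_size : Int) (out : List (Int × Int × (List (Int × Int)))) : Decidable (Spec_all_possible_perturbations original_cells grid_size out) := by unfold Spec_all_possible_perturbations; infer_instance

-- ===== CLAIM (what is proved, stated in full; the proofs are below) =====
def Claim_equal_all_possible_perturbations : Prop := ∀ (original_cells : List (Int × Int)) (grid_size : Int), Dom_all_possible_perturbations original_cells grid_size → Spec_all_possible_perturbations original_cells grid_size (all_possible_perturbations original_cells grid_size)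

-- ===== LEMMAS AND PROOFS =====

-- A's loop body (skip / check / append) as filter-map
theorem pv_foldl_skip_if {α β : Type} (p q : β → Bool) (f : β → α) (l : List β) (acc : List α) :
    l.foldl (fun a x => if p x then a else if q x then a ++ [f x] else a) acc
      = acc ++ (l.filter (fun x => !p x && q x)).map f := by
  induction l generalizing acc with
  | nil => simp
  | cons x t ih =>
    simp only [List.foldl_cons, List.filter_cons]
    cases hp : p x <;> cases hq : q x <;> simp [ih]

-- drop elements the body maps to [] before flatMap
theorem pv_flatMap_filter {α β : Type} (p : β → Bool) (f : β → List α) (l : List β)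
    (h : ∀ x ∈ l, p x = false → f x = []) :
    l.flatMap f = (l.filter p).flatMap f := by
  induction l with
  | nil => rfl
  | cons x t ih =>
    simp only [List.flatMap_cons, List.filter_cons]
    cases hp : p x
    · rw [h x (by simp) hp]; simp [ih (fun y hy => h y (by simp [hy]))]
    · simp [ih (fun y hy => h y (by simp [hy]))]

-- the bounds check over all cells equals the check on the four extremes (nonempty list)
theorem pv_all_eq_extremes (cells : List (Int × Int)) (g dx dy : Int) (hne : cells ≠ []) :
    (cells.all (fun p => decide (0 ≤ p.1 + dx) && decide (p.1 + dx < g) &&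
                          (decide (0 ≤ p.2 + dy) && decide (p.2 + dy < g))))
      = ((decide (0 ≤ ((PySem.List.min? (cells.map (fun p => p.1)) (fun v => v)).getD 0) + dx) &&
          decide (((PySem.List.max? (cells.map (fun p => p.1)) (fun v => v)).getD 0) + dx < g)) &&
         (decide (0 ≤ ((PySem.List.min? (cells.map (fun p => p.2)) (fun v => v)).getD 0) + dy) &&
          decide (((PySem.List.max? (cells.map (fun p => p.2)) (fun v => v)).getD 0) + dy < g))) := by
  obtain ⟨mx, hmx⟩ : ∃ m, PySem.List.min? (cells.map (fun p => p.1)) (fun v => v) = some m := by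
    cases h : PySem.List.min? (cells.map (fun p => p.1)) (fun v => v) with
    | none => exact absurd (by simpa using (PySem.List.min?_eq_none_iff _ _).1 h) hne
    | some m => exact ⟨m, rfl⟩
  obtain ⟨Mx, hMx⟩ : ∃ m, PySem.List.max? (cells.map (fun p => p.1)) (fun v => v) = some m := by
    cases h : PySem.List.max? (cells.map (fun p => p.1)) (fun v => v) with
    | none => exact absurd (by simpa using (PySem.List.max?_eq_none_iff _ _).1 h) hne
    | some m => exact ⟨m, rfl⟩
  obtain ⟨my, hmy⟩ : ∃ m, PySem.List.min? (cells.map (fun p => p.2)) (fun v => v) = some m := by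
    cases h : PySem.List.min? (cells.map (fun p => p.2)) (fun v => v) with
    | none => exact absurd (by simpa using (PySem.List.min?_eq_none_iff _ _).1 h) hne
    | some m => exact ⟨m, rfl⟩
  obtain ⟨My, hMy⟩ : ∃ m, PySem.List.max? (cells.map (fun p => p.2)) (fun v => v) = some m := by
    cases h : PySem.List.max? (cells.map (fun p => p.2)) (fun v => v) with
    | none => exact absurd (by simpa using (PySem.List.max?_eq_none_iff _ _).1 h) hne
    | some m => exact ⟨m, rfl⟩
  have hmx_mem := PySem.List.min?_mem hmx
  have hMx_mem := PySem.List.max?_mem hMx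
  have hmy_mem := PySem.List.min?_mem hmy
  have hMy_mem := PySem.List.max?_mem hMy
  have hmx_min := PySem.List.min?_isMin hmx
  have hMx_max := PySem.List.max?_isMax hMx
  have hmy_min := PySem.List.min?_isMin hmy
  have hMy_max := PySem.List.max?_isMax hMy
  rw [hmx, hMx, hmy, hMy]
  simp only [Option.getD_some]
  rw [Bool.eq_iff_iff]
  simp only [List.all_eq_true, Bool.and_eq_true, decide_eq_true_eq, List.mem_map,
    forall_exists_index, and_imp] at *
  constructor
  · rintro h
    obtain ⟨pmx, hpmx, hpmx'⟩ := hmx_mem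
    obtain ⟨pMx, hpMx, hpMx'⟩ := hMx_mem
    obtain ⟨pmy, hpmy, hpmy'⟩ := hmy_mem
    obtain ⟨pMy, hpMy, hpMy'⟩ := hMy_mem
    have h1 := h pmx hpmx
    have h2 := h pMx hpMx
    have h3 := h pmy hpmy
    have h4 := h pMy hpMy
    subst hpmx' hpMx' hpmy' hpMy'
    exact ⟨⟨h1.1.1, h2.1.2⟩, h3.2.1, h4.2.2⟩
  · rintro ⟨⟨h1, h2⟩, h3, h4⟩ p hp
    have a1 := hmx_min p.1 p hp rfl
    have a2 := hMx_max p.1 p hp rfl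
    have a3 := hmy_min p.2 p hp rfl
    have a4 := hMy_max p.2 p hp rfl
    exact ⟨⟨by omega, by omega⟩, by omega, by omega⟩

-- independent dx/dy validity splits the filtered double loop into a product of filters
theorem pv_split {γ : Type} (rng : List Int) (px py : Int → Bool) (e : Int → Int → γ) :
    rng.flatMap (fun dx => (rng.filter (fun dy => !(dx == 0 && dy == 0) && (px dx && py dy))).map (e dx))
      = (rng.filter px).flatMap (fun dx =>
          ((rng.filter py).filter (fun dy => !(dx == 0 && dy == 0))).map (e dx)) := by
  rw [pv_flatMap_filter px _ _ (by
    intro dx _ hdx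
    have h0 : (rng.filter (fun dy => !(dx == 0 && dy == 0) && (px dx && py dy))) = [] :=
      List.filter_eq_nil_iff.2 (fun dy _ => by simp [hdx])
    rw [h0]; rfl)]
  unfold List.flatMap
  apply congrArg
  apply List.map_congr_left
  intro dx hdx
  have hpxdx : px dx = true := by
    have := List.mem_filter.1 hdx
    simpa using this.2
  apply congrArg
  rw [List.filter_filter]
  apply List.filter_congr
  intro dy _
  rw [hpxdx]
  cases (dx == 0 && dy == 0) <;> cases py dy <;> simp

-- ===== VERDICT (by name: the statement is the Claim_ definition above) =====
theorem all_possible_perturbations_spec : Claim_equal_all_possible_perturbations := by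
  intro cells g _
  unfold Spec_all_possible_perturbations all_possible_perturbations all_possible_perturbations_alt
  -- reshape A's double foldl into flatMap / filter / map
  have hA : ∀ acc : List (Int × Int × (List (Int × Int))),
      (PySem.List.pyRange (-2) 3 1).foldl (fun perturbations dx =>
        (PySem.List.pyRange (-2) 3 1).foldl (fun perturbations dy =>
          if dx == 0 && dy == 0 then perturbations
          else
            let new_cells := cells.map (fun p => (p.1 + dx, p.2 + dy))
            if new_cells.all (fun p => decide (0 ≤ p.1) && decide (p.1 < g) &&
                                       (decide (0 ≤ p.2) && decide (p.2 < g))) then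
              perturbations ++ [(dx, dy, new_cells)]
            else perturbations) perturbations) acc
      = acc ++ (PySem.List.pyRange (-2) 3 1).flatMap (fun dx =>
          ((PySem.List.pyRange (-2) 3 1).filter (fun dy => !(dx == 0 && dy == 0) &&
              (cells.map (fun p => (p.1 + dx, p.2 + dy))).all
                (fun p => decide (0 ≤ p.1) && decide (p.1 < g) &&
                          (decide (0 ≤ p.2) && decide (p.2 < g))))).map
            (fun dy => (dx, dy, cells.map (fun p => (p.1 + dx, p.2 + dy))))) := by
    intro acc
    have hinner : ∀ (dx : Int) (a : List (Int × Int × (List (Int × Int)))),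
        (PySem.List.pyRange (-2) 3 1).foldl (fun perturbations dy =>
          if dx == 0 && dy == 0 then perturbations
          else
            let new_cells := cells.map (fun p => (p.1 + dx, p.2 + dy))
            if new_cells.all (fun p => decide (0 ≤ p.1) && decide (p.1 < g) &&
                                       (decide (0 ≤ p.2) && decide (p.2 < g))) then
              perturbations ++ [(dx, dy, new_cells)]
            else perturbations) a
        = a ++ ((PySem.List.pyRange (-2) 3 1).filter (fun dy => !(dx == 0 && dy == 0) &&
              (cells.map (fun p => (p.1 + dx, p.2 + dy))).all
                (fun p => decide (0 ≤ p.1) && decide (p.1 < g) &&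
                          (decide (0 ≤ p.2) && decide (p.2 < g))))).map
            (fun dy => (dx, dy, cells.map (fun p => (p.1 + dx, p.2 + dy)))) := by
      intro dx a
      exact pv_foldl_skip_if (fun dy => dx == 0 && dy == 0)
        (fun dy => (cells.map (fun p => (p.1 + dx, p.2 + dy))).all
          (fun p => decide (0 ≤ p.1) && decide (p.1 < g) && (decide (0 ≤ p.2) && decide (p.2 < g))))
        (fun dy => (dx, dy, cells.map (fun p => (p.1 + dx, p.2 + dy)))) _ a
    calc _ = (PySem.List.pyRange (-2) 3 1).foldl (fun a dx => a ++ _) acc := by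
              simp only [hinner]
         _ = _ := PySem.List.foldl_append_eq_flatMap _ _ _
  rw [hA]
  simp only [List.nil_append]
  by_cases hne : cells = []
  · subst hne
    simp
  · simp only [if_neg hne]
    -- rewrite the all-cells check into the extremes check
    have hchk : ∀ dx dy : Int,
        ((cells.map (fun p => (p.1 + dx, p.2 + dy))).all
          (fun p => decide (0 ≤ p.1) && decide (p.1 < g) && (decide (0 ≤ p.2) && decide (p.2 < g))))
        = ((decide (0 ≤ ((PySem.List.min? (cells.map (fun p => p.1)) (fun v => v)).getD 0) + dx) &&
            decide (((PySem.List.max? (cells.map (fun p => p.1)) (fun v => v)).getD 0) + dx < g)) &&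
           (decide (0 ≤ ((PySem.List.min? (cells.map (fun p => p.2)) (fun v => v)).getD 0) + dy) &&
            decide (((PySem.List.max? (cells.map (fun p => p.2)) (fun v => v)).getD 0) + dy < g))) := by
      intro dx dy
      rw [List.all_map]
      exact pv_all_eq_extremes cells g dx dy hne
    simp only [hchk]
    exact pv_split (PySem.List.pyRange (-2) 3 1)
      (fun dx => decide (0 ≤ ((PySem.List.min? (cells.map (fun p => p.1)) (fun v => v)).getD 0) + dx) &&
                 decide (((PySem.List.max? (cells.map (fun p => p.1)) (fun v => v)).getD 0) + dx < g))
      (fun dy => decide (0 ≤ ((PySem.List.min? (cells.map (fun p => p.2)) (fun v => v)).getD 0) + dy) &&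
                 decide (((PySem.List.max? (cells.map (fun p => p.2)) (fun v => v)).getD 0) + dy < g))
      (fun dx dy => (dx, dy, cells.map (fun p => (p.1 + dx, p.2 + dy))))
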